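-- pv_equiv track=rewrite | github.com/soiejung/Algorithm | CodeApp/프로그래머스/명예의 전당_1.py | solution
-- ===== SOURCE A (Python) =====
-- import heapq
--
-- def solution(k, score):
--     answer = []
--
--     lst = []
--     lst.append(score[0])
--     answer.append(score[0])
--     for i in range(1,len(score)):
--         heapq.heapify(lst)
--         min_ = lst[0]
--         if len(lst) == k:
--             if score[i] > min_:
--                 heapq.heappop(lst)
--                 heapq.heappush(lst,score[i])
--                 min_ = lst[0]
--         elif len(lst) < k:
--             heapq.heappush(lst,score[i])
--             min_ = lst[0]
--         answer.append(min_)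
--
--
--     return answer
-- ===== SOURCE B (Python) =====
-- def solution(k, score):
--     # k-th highest score seen so far at each step: sort each prefix ascending
--     # and read position max(i+1-k, 0) (the k-th largest once >= k elements
--     # exist, the running minimum before that).
--     return [sorted(score[:i + 1])[max(i + 1 - k, 0)] for i in range(len(score))]
-- ===== Notes on version B (the rewrite author's own statement) =====
-- stated objective: simpler
-- what changed: Replaces the incremental heap bookkeeping (heapify/heappop/heappush with a carried min_) by a one-line comprehension that re-sorts each growing prefix and reads position max(i+1-k, 0).
-- outside the precondition, e.g. on solution(0, [3, 1, 2]): A returns [3, 3, 3], B raises IndexError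
import Mathlib
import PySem

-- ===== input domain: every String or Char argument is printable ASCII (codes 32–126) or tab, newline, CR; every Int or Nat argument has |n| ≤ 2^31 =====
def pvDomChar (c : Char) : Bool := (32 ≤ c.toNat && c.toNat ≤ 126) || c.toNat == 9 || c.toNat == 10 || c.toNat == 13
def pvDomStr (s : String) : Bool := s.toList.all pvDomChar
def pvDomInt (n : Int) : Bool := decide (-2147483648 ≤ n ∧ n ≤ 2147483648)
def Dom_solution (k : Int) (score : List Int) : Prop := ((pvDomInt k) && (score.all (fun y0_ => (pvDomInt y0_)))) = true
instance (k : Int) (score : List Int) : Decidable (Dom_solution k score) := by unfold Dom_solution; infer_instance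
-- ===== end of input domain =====

-- B replaces A's incremental heap bookkeeping by a one-line prefix re-sort (objective: simpler).

-- ===== PORT A =====
-- heapq is not in PySem; its observable behaviour here is ported by hand:
-- after heapq.heapify, lst[0] is the minimum of lst; heapq.heappop removes that minimum;
-- heapq.heappush appends the element.  A never observes the heap's internal array layout
-- (only lst[0] right after heapify, and len(lst)), so this multiset-exact model of the
-- three heapq calls is exact for A's result.
def pyHeapMin (l : List Int) : Int := (l.min?).getD 0   -- lst[0] after heapify (lst is never empty when read)

-- loop body of A's 'for i in range(1, len(score))'
def stepA (k : Int) (st : List Int × List Int) (x : Int) : List Int × List Int :=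
  -- st = (lst, answer); min_ = lst[0] after heapify = pyHeapMin st.1
  if (st.1.length : Int) = k then
    if x > pyHeapMin st.1 then
      -- heappop (removes the min), then heappush; min_ is re-read from the new heap
      (st.1.erase (pyHeapMin st.1) ++ [x],
       st.2 ++ [pyHeapMin (st.1.erase (pyHeapMin st.1) ++ [x])])
    else (st.1, st.2 ++ [pyHeapMin st.1])
  else if (st.1.length : Int) < k then
    (st.1 ++ [x], st.2 ++ [pyHeapMin (st.1 ++ [x])])   -- heappush
  else (st.1, st.2 ++ [pyHeapMin st.1])

def solution (k : Int) (score : List Int) : List Int :=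
  match score with
  | [] => []   -- unreachable under Pre_solution: Python raises IndexError on score[0]
  | s0 :: rest =>
    -- successive score[i] for i in range(1, len(score)) are the elements of rest
    (rest.foldl (stepA k) ([s0], [s0])).2

-- ===== PORT B =====
def solution_alt (k : Int) (score : List Int) : List Int :=
  (PySem.List.pyRange 0 (score.length : Int) 1).map (fun i =>
    PySem.List.pyGetD
      (PySem.List.sorted (PySem.List.slice score none (some (i + 1))) (fun x => x) false)
      (max (i + 1 - k) 0) 0)

-- ===== PRECONDITION & SPEC =====
-- Pre_ excludes the empty score, on which A raises IndexError at score[0], and k ≤ 0, a k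
-- outside the problem's meaning, on which B's out-of-range prefix index raises IndexError
-- while A returns a value.
def Pre_solution (k : Int) (score : List Int) : Prop := score ≠ [] ∧ 1 ≤ k
instance (k : Int) (score : List Int) : Decidable (Pre_solution k score) := by unfold Pre_solution; infer_instance
def pvWitness_solution : Int × List Int := (2, [10, 20, 15])

def Spec_solution (k : Int) (score : List Int) (out : List Int) : Prop := out = solution_alt k score
instance (k : Int) (score : List Int) (out : List Int) : Decidable (Spec_solution k score out) := by unfold Spec_solution; infer_instance

-- ===== CLAIM (what is proved, stated in full; the proofs are below) =====
def Claim_equal_solution : Prop := ∀ (k : Int) (score : List Int), Dom_solution k score → Pre_solution k score → Spec_solution k score (solution k score)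

-- ===== LEMMAS AND PROOFS =====

-- proof-side abbreviation: Python's sorted(q) on Ints
def sortI (l : List Int) : List Int := PySem.List.sorted l (fun x => x) false

-- proof-side: the element B produces for the (nonempty) prefix q
def entB (k : Int) (q : List Int) : Int :=
  PySem.List.pyGetD (sortI q) (max ((q.length : Int) - k) 0) 0

theorem sortI_pairwise (l : List Int) : (sortI l).Pairwise (· ≤ ·) :=
  PySem.List.sorted_pairwise l (fun x => x)

theorem sortI_perm (l : List Int) : (sortI l).Perm l := PySem.List.sorted_perm ..

theorem sortI_length (l : List Int) : (sortI l).length = l.length :=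
  (sortI_perm l).length_eq

theorem sortI_congr_perm {l₁ l₂ : List Int} (h : l₁.Perm l₂) : sortI l₁ = sortI l₂ := by
  unfold sortI
  exact PySem.List.sorted_id_eq_of_perm_of_pairwise _ _ ((sortI_perm l₂).trans h.symm)
    (sortI_pairwise l₂)

theorem sortI_of_pairwise {l : List Int} (h : l.Pairwise (· ≤ ·)) : sortI l = l :=
  PySem.List.sorted_eq_self_of_pairwise l (fun x => x) h

theorem sortI_append_singleton (l : List Int) (x : Int) :
    sortI (l ++ [x]) = List.orderedInsert (· ≤ ·) x (sortI l) := by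
  unfold sortI
  refine PySem.List.sorted_id_eq_of_perm_of_pairwise _ _ ?_ ?_
  · exact (List.perm_orderedInsert _ _ _).trans
      ((List.Perm.cons x (sortI_perm l)).trans (List.perm_append_singleton x l).symm)
  · exact (sortI_pairwise l).orderedInsert x _

theorem min?_eq_head_sortI (l : List Int) : l.min? = (sortI l).head? := by
  cases h : sortI l with
  | nil =>
    have hnil : l = [] := List.Perm.eq_nil (h ▸ sortI_perm l).symm
    simp [hnil]
  | cons m t =>
    have hm : m ∈ l := (List.Perm.mem_iff (sortI_perm l)).1 (by simp [h])
    have hle : ∀ b ∈ l, m ≤ b :=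
      PySem.List.key_head_sorted_le l (fun x => x) h
    simp [List.min?_eq_some_iff.2 ⟨hm, hle⟩]

theorem pyHeapMin_eq (l : List Int) : pyHeapMin l = (sortI l).head?.getD 0 := by
  rw [pyHeapMin, min?_eq_head_sortI]

-- dropping past the insertion point of an orderedInsert into a sorted list
theorem oi_drop_le (x : Int) :
    ∀ (s : List Int) (d : Nat), s.Pairwise (· ≤ ·) → ∀ (h : d < s.length), x ≤ s[d] →
      (List.orderedInsert (· ≤ ·) x s).drop (d+1) = s.drop d := by
  intro s
  induction s with
  | nil => intro d _ h; simp at h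
  | cons a t ih =>
    intro d hp h hx
    cases d with
    | zero =>
      simp only [List.getElem_cons_zero] at hx
      simp [List.orderedInsert, hx]
    | succ d =>
      have hdt : d < t.length := by simpa using h
      simp only [List.getElem_cons_succ] at hx
      by_cases hxa : x ≤ a
      · simp [List.orderedInsert, hxa]
      · simp only [List.orderedInsert, if_neg hxa, List.drop_succ_cons]
        exact ih d (List.Pairwise.of_cons hp) hdt hx

theorem oi_drop_gt (x : Int) :
    ∀ (s : List Int) (d : Nat), s.Pairwise (· ≤ ·) → ∀ (h : d < s.length), s[d] < x →
      (List.orderedInsert (· ≤ ·) x s).drop (d+1) = List.orderedInsert (· ≤ ·) x (s.drop (d+1)) := by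
  intro s
  induction s with
  | nil => intro d _ h; simp at h
  | cons a t ih =>
    intro d hp h hx
    cases d with
    | zero =>
      simp only [List.getElem_cons_zero] at hx
      simp [List.orderedInsert, not_le.2 hx]
    | succ d =>
      have hdt : d < t.length := by simpa using h
      simp only [List.getElem_cons_succ] at hx
      have ha : a ≤ t[d] := (List.pairwise_cons.1 hp).1 _ (List.getElem_mem hdt)
      have hxa : ¬ x ≤ a := not_le.2 (lt_of_le_of_lt ha hx)
      simp only [List.orderedInsert, if_neg hxa, List.drop_succ_cons]
      exact ih d (List.Pairwise.of_cons hp) hdt hx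

-- B's element for a nonempty prefix, as head of the dropped sorted prefix
theorem entB_eq (k : Int) (hk : 1 ≤ k) (q : List Int) (hq : q ≠ []) :
    entB k q = ((sortI q).drop (q.length - k.toNat)).head?.getD 0 := by
  have hqlen : 0 < q.length := List.length_pos_of_ne_nil hq
  have h0 : (0:Int) ≤ max ((q.length : Int) - k) 0 := le_max_right _ _
  have hlt : max ((q.length : Int) - k) 0 < ((sortI q).length : Int) := by
    rw [sortI_length]; omega
  have hidx : (max ((q.length : Int) - k) 0).toNat = q.length - k.toNat := by omega
  rw [entB, PySem.List.pyGetD_eq_getElem _ 0 h0 hlt, List.head?_drop, ← hidx,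
    List.getElem?_eq_getElem (by rw [sortI_length]; omega)]
  rfl

-- one iteration of A's loop: the appended answer element is B's element for the
-- extended prefix, and the invariant is preserved
theorem stepA_spec (k' : Nat) (hk : 1 ≤ k') (p lst answer : List Int) (hp : p ≠ [])
    (hl : sortI lst = (sortI p).drop (p.length - k')) (x : Int) :
    ∃ lst', stepA (k' : Nat) (lst, answer) x = (lst', answer ++ [entB (k' : Nat) (p ++ [x])]) ∧
      sortI lst' = (sortI (p ++ [x])).drop (p.length + 1 - k') := by
  have hplen : 0 < p.length := List.length_pos_of_ne_nil hp
  have hsplen : (sortI p).length = p.length := sortI_length p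
  have hlstlen : lst.length = (sortI p).length - (p.length - k') := by
    rw [← sortI_length lst, hl, List.length_drop]
  have hkk : ((k' : Nat) : Int).toNat = k' := by omega
  have hoi := sortI_append_singleton p x
  have hlen1 : (p ++ [x]).length = p.length + 1 := by simp
  by_cases hpk : k' ≤ p.length
  · -- the heap is full: len(lst) == k
    have hd : p.length - k' < (sortI p).length := by omega
    have hcond : ((lst.length : Nat) : Int) = (k' : Int) := by omega
    have hmin : pyHeapMin lst = (sortI p)[p.length - k'] := by
      rw [pyHeapMin_eq, hl, List.head?_drop, List.getElem?_eq_getElem hd]; rfl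
    have hdrop : (sortI p).drop (p.length - k') =
        (sortI p)[p.length - k'] :: (sortI p).drop (p.length - k' + 1) :=
      List.drop_eq_getElem_cons hd
    have hd1 : p.length + 1 - k' = (p.length - k') + 1 := by omega
    by_cases hx : (sortI p)[p.length - k'] < x
    · -- score[i] > min_: pop the min, push score[i]
      have hperm : (lst.erase ((sortI p)[p.length - k'])).Perm
          ((sortI p).drop (p.length - k' + 1)) := by
        have h1 : lst.Perm ((sortI p).drop (p.length - k')) := hl ▸ (sortI_perm lst).symm
        have h2 := h1.erase ((sortI p)[p.length - k'])
        rw [hdrop, List.erase_cons_head] at h2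
        exact h2
      have hsorted : ((sortI p).drop (p.length - k' + 1)).Pairwise (· ≤ ·) :=
        List.Pairwise.sublist (List.drop_sublist _ _) (sortI_pairwise p)
      have hnew : sortI ((lst.erase (pyHeapMin lst)) ++ [x])
          = (sortI (p ++ [x])).drop (p.length + 1 - k') := by
        rw [hmin, sortI_append_singleton, sortI_congr_perm hperm, sortI_of_pairwise hsorted,
          hoi, hd1, oi_drop_gt x (sortI p) (p.length - k') (sortI_pairwise p) hd hx]
      refine ⟨(lst.erase (pyHeapMin lst)) ++ [x], ?_, hnew⟩
      have hgt : x > pyHeapMin lst := by rw [hmin]; exact hx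
      simp only [stepA]
      rw [if_pos hcond, if_pos hgt]
      refine congrArg (Prod.mk _) (congrArg (fun v => answer ++ [v]) ?_)
      rw [pyHeapMin_eq ((lst.erase (pyHeapMin lst)) ++ [x]), hnew,
        entB_eq _ (by omega) _ (by simp), hlen1, hkk]
    · -- score[i] <= min_: nothing changes
      push_neg at hx
      have hdropped := oi_drop_le x (sortI p) (p.length - k') (sortI_pairwise p) hd hx
      have hkeep : sortI lst = (sortI (p ++ [x])).drop (p.length + 1 - k') := by
        rw [hoi, hd1, hdropped, hl]
      refine ⟨lst, ?_, hkeep⟩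
      have hngt : ¬ (x > pyHeapMin lst) := by rw [hmin]; exact not_lt.2 hx
      simp only [stepA]
      rw [if_pos hcond, if_neg hngt]
      refine congrArg (Prod.mk _) (congrArg (fun v => answer ++ [v]) ?_)
      rw [pyHeapMin_eq lst, hkeep, entB_eq _ (by omega) _ (by simp), hlen1, hkk]
  · -- the heap is not full yet: len(lst) < k
    push_neg at hpk
    have hne : ¬ ((lst.length : Nat) : Int) = (k' : Int) := by omega
    have hltk : ((lst.length : Nat) : Int) < (k' : Int) := by omega
    have hl' : sortI lst = sortI p := by
      rw [hl, show p.length - k' = 0 from by omega, List.drop_zero]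
    have hnew : sortI (lst ++ [x]) = (sortI (p ++ [x])).drop (p.length + 1 - k') := by
      rw [sortI_append_singleton, sortI_append_singleton, hl',
        show p.length + 1 - k' = 0 from by omega, List.drop_zero]
    refine ⟨lst ++ [x], ?_, hnew⟩
    simp only [stepA]
    rw [if_neg hne, if_pos hltk]
    refine congrArg (Prod.mk _) (congrArg (fun v => answer ++ [v]) ?_)
    rw [pyHeapMin_eq (lst ++ [x]), hnew, entB_eq _ (by omega) _ (by simp), hlen1, hkk]

-- the loop invariant carried over the whole of A's for-loop
theorem loopA (k' : Nat) (hk : 1 ≤ k') :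
    ∀ (rest p lst answer : List Int), p ≠ [] →
      sortI lst = (sortI p).drop (p.length - k') →
      (rest.foldl (stepA (k' : Int)) (lst, answer)).2
        = answer ++ (List.range rest.length).map (fun j => entB (k' : Int) (p ++ rest.take (j+1))) := by
  intro rest
  induction rest with
  | nil => intro p lst answer _ _; simp
  | cons x xs ih =>
    intro p lst answer hp hl
    obtain ⟨lst', hstep, hinv⟩ := stepA_spec k' hk p lst answer hp hl x
    rw [List.foldl_cons, hstep,
      ih (p ++ [x]) lst' (answer ++ [entB (k' : Int) (p ++ [x])]) (by simp)
        (by rw [hinv]; congr 1; simp)]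
    rw [List.length_cons, List.range_succ_eq_map, List.map_cons, List.map_map,
      List.append_assoc, List.singleton_append]
    refine congrArg _ (congrArg _ (List.map_congr_left fun j _ => ?_))
    simp [Function.comp, List.take_succ_cons]

-- B's port, rewritten as a map of entB over the prefixes
theorem alt_eq (k : Int) (score : List Int) :
    solution_alt k score = (List.range score.length).map (fun j => entB k (score.take (j+1))) := by
  unfold solution_alt
  rw [PySem.List.pyRange_one]
  simp only [Int.sub_zero, Int.toNat_natCast, List.map_map]
  refine List.map_congr_left ?_
  intro j hj
  rw [List.mem_range] at hj
  simp only [Function.comp, Int.zero_add]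
  have hb : ((j : Int) + 1) = ((j + 1 : Nat) : Int) := by push_cast; ring
  rw [entB, sortI, hb, PySem.List.slice_to_natCast]
  have hlen : (score.take (j+1)).length = j + 1 := by
    rw [List.length_take]; omega
  rw [hlen]

-- ===== VERDICT (by name: the statement is the Claim_ definition above) =====
theorem solution_spec : Claim_equal_solution := by
  intro k score _ hpre
  obtain ⟨hne, hk⟩ := hpre
  unfold Spec_solution
  cases score with
  | nil => exact absurd rfl hne
  | cons s0 rest =>
    have hkk : ((k.toNat : Nat) : Int) = k := Int.toNat_of_nonneg (by omega)
    have hk1 : 1 ≤ k.toNat := by omega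
    have hbase : sortI [s0] = (sortI [s0]).drop (([s0] : List Int).length - k.toNat) := by
      rw [List.length_cons, List.length_nil, show 0 + 1 - k.toNat = 0 from by omega,
        List.drop_zero]
    have hA : solution k (s0 :: rest)
        = [s0] ++ (List.range rest.length).map (fun j => entB k ([s0] ++ rest.take (j+1))) := by
      rw [solution, ← hkk, loopA k.toNat hk1 rest [s0] [s0] [s0] (by simp) hbase]
    have hent0 : entB k [s0] = s0 := by
      have h10 : ([s0] : List Int).length - k.toNat = 0 := by
        simp only [List.length_cons, List.length_nil]; omega
      rw [entB_eq k hk [s0] (by simp), sortI_of_pairwise (List.pairwise_singleton _ s0),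
        h10, List.drop_zero]
      rfl
    rw [hA, alt_eq, List.length_cons, List.range_succ_eq_map, List.map_cons, List.map_map,
      List.singleton_append]
    refine congr (congrArg _ ?_) (List.map_congr_left fun j _ => ?_)
    · simp [List.take_succ_cons, hent0]
    · simp [Function.comp, List.take_succ_cons]
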